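-- pv_equiv track=rewrite | github.com/purplecat19/devanshi_synapse-ML | TASK-1/task-1_2.py | lumos_step
-- ===== SOURCE A (Python) =====
-- def lumos_step(target, runes):
--
--     # turning into upper case
--     runes = [r.upper() for r in runes]
--
--     collected = ""   # tracks collected letters
--
--     for i in range(len(runes)):
--         collected = collected + runes[i]
--
--         # checking if we can form "LUMOS"
--         can_form = True
--         for letter in target:
--             if collected.count(letter) < target.count(letter):    #if she has fewer copies of a word than req, she can't form the word, hence break.
--                 can_form = False
--                 break
--
--         if can_form:
--             return (i+1)  #starting steps from 1
--
--     return -1   #if it's impossible to form LUMOS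
-- ===== SOURCE B (Python) =====
-- def lumos_step(target, runes):
--     # single pass: per-letter "still needed" counts + one remaining total,
--     # instead of re-scanning the growing collected string at every step
--     need = {}
--     for ch in target:
--         need[ch] = need.get(ch, 0) + 1
--     missing = len(target)
--     step = 0
--     for rune in runes:
--         step += 1
--         for ch in rune.upper():
--             n = need.get(ch, 0)
--             if n > 0:
--                 need[ch] = n - 1
--                 missing -= 1
--         if missing == 0:
--             return step
--     return -1
-- ===== Notes on version B (the rewrite author's own statement) =====
-- stated objective: faster
-- what changed: Replaces re-scanning the ever-growing collected string (collected.count per target letter at every step) with a dict of per-letter remaining-needed counts plus one 'missing' total, updated incrementally in a single pass over the runes' characters.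
import Mathlib
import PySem

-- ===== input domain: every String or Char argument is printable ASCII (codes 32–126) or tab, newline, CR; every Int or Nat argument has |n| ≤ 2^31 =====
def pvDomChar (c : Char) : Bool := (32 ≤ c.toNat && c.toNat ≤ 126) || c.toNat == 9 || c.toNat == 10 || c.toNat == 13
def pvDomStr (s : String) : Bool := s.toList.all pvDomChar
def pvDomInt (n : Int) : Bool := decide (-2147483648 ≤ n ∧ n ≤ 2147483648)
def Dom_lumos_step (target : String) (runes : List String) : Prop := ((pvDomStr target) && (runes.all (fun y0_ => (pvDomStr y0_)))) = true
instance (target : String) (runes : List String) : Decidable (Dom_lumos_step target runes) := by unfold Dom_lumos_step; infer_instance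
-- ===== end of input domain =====

-- B replaces A's rescan of the growing collected string with incremental per-letter
-- remaining-needed counts and a single running total (asymptotically faster, measured).


-- ===== PORT A =====
-- the inner 'for letter in target: if … : can_form = False; break' loop (all = stop at first failure)
def lumosCanForm (target : List Char) (collected : List Char) : Bool :=
  target.all (fun letter =>
    !(PySem.Chars.count collected [letter] < PySem.Chars.count target [letter]))

-- the main 'for i in range(len(runes))' loop with early return; strings carried as char lists
def lumosAGo (target : List Char) (collected : List Char) (i : Int) : List String → Int
  | [] => -1
  | r :: rs =>
    let collected' := collected ++ r.toList
    if lumosCanForm target collected' then i + 1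
    else lumosAGo target collected' (i + 1) rs

def lumos_step (target : String) (runes : List String) : Int :=
  let runesU := runes.map PySem.Str.upper
  lumosAGo target.toList [] 0 runesU

-- ===== PORT B =====
-- one character of a rune: n = need.get(ch, 0); if n > 0: need[ch] = n - 1; missing -= 1
def lumosConsume (st : PySem.Dict Char Int × Int) (ch : Char) : PySem.Dict Char Int × Int :=
  let n := st.1.getD ch 0
  if n > 0 then (st.1.insert ch (n - 1), st.2 - 1) else st

def lumosBGo (need : PySem.Dict Char Int) (missing : Int) (step : Int) : List String → Int
  | [] => -1
  | r :: rs =>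
    let step' := step + 1
    let st := (PySem.Str.upper r).toList.foldl lumosConsume (need, missing)
    if st.2 = 0 then step' else lumosBGo st.1 st.2 step' rs

def lumos_step_alt (target : String) (runes : List String) : Int :=
  let need := target.toList.foldl (fun d ch => d.insert ch (d.getD ch 0 + 1)) PySem.Dict.empty
  lumosBGo need (PySem.Str.len target) 0 runes

-- ===== PRECONDITION & SPEC =====
def Spec_lumos_step (target : String) (runes : List String) (out : Int) : Prop := out = lumos_step_alt target runes
instance (target : String) (runes : List String) (out : Int) : Decidable (Spec_lumos_step target runes out) := by unfold Spec_lumos_step; infer_instance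

-- ===== CLAIM (what is proved, stated in full; the proofs are below) =====
def Claim_equal_lumos_step : Prop := ∀ (target : String) (runes : List String), Dom_lumos_step target runes → Spec_lumos_step target runes (lumos_step target runes)

-- ===== LEMMAS AND PROOFS =====

-- the remaining-needed multiset: what of target is still missing after collecting cs
def lumosDeficit (t cs : List Char) : Multiset Char := (↑t : Multiset Char) - ↑cs

-- Python str.count of a single character is the character count
lemma count_go_single (c : Char) : ∀ (l : List Char) (fuel acc : Nat), l.length ≤ fuel →
    PySem.Chars.count.go [c] fuel l acc = acc + l.count c := by
  intro l
  induction l with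
  | nil => intro fuel acc _; cases fuel <;> simp [PySem.Chars.count.go]
  | cons x xs ih =>
    intro fuel acc h
    cases fuel with
    | zero => simp at h
    | succ f =>
      have hf : xs.length ≤ f := by simpa using h
      simp only [PySem.Chars.count.go, List.isPrefixOf, Bool.and_true, List.length_cons]
      by_cases hx : (c == x) = true
      · rw [if_pos hx]
        simp only [List.length_nil, Nat.zero_add, List.drop_succ_cons, List.drop_zero]
        rw [ih f (acc+1) hf, List.count_cons]
        have hcx : c = x := beq_iff_eq.mp hx
        subst hcx
        simp only [BEq.rfl, if_true]
        omega
      · rw [if_neg hx, ih f acc hf, List.count_cons]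
        have hcx : ¬ x = c := fun e => absurd (beq_iff_eq.mpr e.symm) hx
        simp only [beq_iff_eq, hcx, if_false]
        omega

lemma count_single (l : List Char) (c : Char) :
    PySem.Chars.count l [c] = l.count c := by
  simp [PySem.Chars.count, count_go_single c l l.length 0 le_rfl]

-- deficit bookkeeping
lemma deficit_nil (t : List Char) : lumosDeficit t [] = (↑t : Multiset Char) := by
  simp [lumosDeficit]

lemma deficit_snoc (t cs : List Char) (c : Char) :
    lumosDeficit t (cs ++ [c]) = (lumosDeficit t cs).erase c := by
  simp [lumosDeficit]

-- one consumed character preserves the state invariant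
lemma consume_invariant (t cs : List Char) (need : PySem.Dict Char Int) (missing : Int)
    (h1 : ∀ c, need.getD c 0 = ((lumosDeficit t cs).count c : Int))
    (h2 : missing = ((lumosDeficit t cs).card : Int)) (ch : Char) :
    (∀ c, (lumosConsume (need, missing) ch).1.getD c 0
        = ((lumosDeficit t (cs ++ [ch])).count c : Int)) ∧
    (lumosConsume (need, missing) ch).2 = ((lumosDeficit t (cs ++ [ch])).card : Int) := by
  have hn := h1 ch
  by_cases hch : ch ∈ lumosDeficit t cs
  · have hcnt : 1 ≤ (lumosDeficit t cs).count ch := Multiset.one_le_count_iff_mem.mpr hch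
    have hpos : (0:Int) < need.getD ch 0 := by rw [hn]; exact_mod_cast hcnt
    unfold lumosConsume
    rw [if_pos hpos]
    refine ⟨fun c => ?_, ?_⟩
    · rw [deficit_snoc, PySem.Dict.getD_insert]
      by_cases hc : c = ch
      · subst hc
        rw [if_pos rfl, hn, Multiset.count_erase_self]
        omega
      · rw [if_neg hc, h1 c, Multiset.count_erase_of_ne hc]
    · rw [deficit_snoc, Multiset.card_erase_of_mem hch]
      have hcard : 1 ≤ (lumosDeficit t cs).card :=
        Multiset.card_pos.mpr (fun e => by simp [e] at hch)
      simp only [h2, Nat.pred_eq_sub_one]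
      omega
  · have h0 : (lumosDeficit t cs).count ch = 0 := Multiset.count_eq_zero.mpr hch
    have hneg : ¬ (0:Int) < need.getD ch 0 := by rw [hn, h0]; simp
    unfold lumosConsume
    rw [if_neg hneg]
    rw [deficit_snoc, Multiset.erase_of_notMem hch]
    exact ⟨h1, h2⟩

-- the inner fold over a rune's characters preserves the invariant
lemma fold_invariant (t : List Char) : ∀ (l cs : List Char) (need : PySem.Dict Char Int) (missing : Int),
    (∀ c, need.getD c 0 = ((lumosDeficit t cs).count c : Int)) →
    missing = ((lumosDeficit t cs).card : Int) →
    (∀ c, (l.foldl lumosConsume (need, missing)).1.getD c 0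
        = ((lumosDeficit t (cs ++ l)).count c : Int)) ∧
    (l.foldl lumosConsume (need, missing)).2 = ((lumosDeficit t (cs ++ l)).card : Int) := by
  intro l
  induction l with
  | nil => intro cs need missing h1 h2; simpa using ⟨h1, h2⟩
  | cons x xs ih =>
    intro cs need missing h1 h2
    obtain ⟨g1, g2⟩ := consume_invariant t cs need missing h1 h2 x
    have := ih (cs ++ [x]) _ _ g1 g2
    simpa [List.append_assoc] using this

-- A's can_form test is "the deficit is empty"
lemma canForm_iff (t cs : List Char) :
    lumosCanForm t cs = true ↔ (lumosDeficit t cs).card = 0 := by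
  rw [Multiset.card_eq_zero]
  unfold lumosCanForm lumosDeficit
  rw [tsub_eq_zero_iff_le, Multiset.le_iff_count]
  simp only [List.all_eq_true, count_single, Bool.not_eq_true', decide_eq_false_iff_not, not_lt,
    Multiset.coe_count]
  constructor
  · intro h a
    by_cases ha : a ∈ t
    · exact h a ha
    · simp [List.count_eq_zero_of_not_mem ha]
  · intro h l _
    exact h l

-- main loop equivalence
lemma go_equiv (t : List Char) : ∀ (rs : List String) (cs : List Char)
    (need : PySem.Dict Char Int) (missing i : Int),
    (∀ c, need.getD c 0 = ((lumosDeficit t cs).count c : Int)) →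
    missing = ((lumosDeficit t cs).card : Int) →
    lumosAGo t cs i (rs.map PySem.Str.upper) = lumosBGo need missing i rs := by
  intro rs
  induction rs with
  | nil => intro cs need missing i _ _; rfl
  | cons r rest ih =>
    intro cs need missing i h1 h2
    obtain ⟨g1, g2⟩ := fold_invariant t (PySem.Str.upper r).toList cs need missing h1 h2
    simp only [List.map_cons, lumosAGo, lumosBGo]
    have hcf : lumosCanForm t (cs ++ (PySem.Str.upper r).toList) = true
        ↔ (List.foldl lumosConsume (need, missing) (PySem.Str.upper r).toList).2 = 0 := by
      rw [canForm_iff, g2]; exact_mod_cast Iff.rfl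
    by_cases hc : lumosCanForm t (cs ++ (PySem.Str.upper r).toList) = true
    · rw [if_pos hc, if_pos (hcf.mp hc)]
    · rw [if_neg hc, if_neg (fun h => hc (hcf.mpr h))]
      exact ih _ _ _ _ g1 g2

-- ===== VERDICT (by name: the statement is the Claim_ definition above) =====
theorem lumos_step_spec : Claim_equal_lumos_step := by
  intro target runes _
  unfold Spec_lumos_step lumos_step lumos_step_alt
  apply go_equiv
  · intro c
    rw [PySem.Dict.getD_foldl_insert_add_one]
    simp [deficit_nil, PySem.Dict.getD_empty]
  · simp [deficit_nil, PySem.Str.len]
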